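-- pv_equiv track=rewrite | github.com/razamu15/StripeInterview | python/compress.py | part1
-- ===== SOURCE A (Python) =====
-- def compress(s):
--     return f'{s[0]}{len(s)-2}{s[-1]}'
--
-- def part1(url:str):
--     compressed_url = []
--     major_parts = url.split('/')
--
--     for each_part in major_parts:
--
--         compressed_parts = []
--         minor_parts = each_part.split('.')
--
--         for part in minor_parts:
--             compressed_parts.append(compress(part))
--
--         compressed_url.append('.'.join(compressed_parts))
--
--     return '/'.join(compressed_url)
-- ===== SOURCE B (Python) =====
-- def compress(s):
--     return f'{s[0]}{len(s)-2}{s[-1]}'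
--
-- def part1(url: str):
--     # single left-to-right pass over the characters: emit the compressed
--     # token at each separator ('/' or '.') and the separator itself
--     out = []
--     tok = []
--     for ch in url:
--         if ch == '/' or ch == '.':
--             out.append(compress(tok))
--             out.append(ch)
--             tok = []
--         else:
--             tok.append(ch)
--     out.append(compress(tok))
--     return ''.join(out)
-- ===== Notes on version B (the rewrite author's own statement) =====
-- stated objective: alternative
-- what changed: Replaces the nested split('/')/split('.') double loop that builds intermediate part lists and joins twice with a single character-level pass that accumulates one token at a time and emits compressed tokens and separators into one output list joined once.
import Mathlib
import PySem

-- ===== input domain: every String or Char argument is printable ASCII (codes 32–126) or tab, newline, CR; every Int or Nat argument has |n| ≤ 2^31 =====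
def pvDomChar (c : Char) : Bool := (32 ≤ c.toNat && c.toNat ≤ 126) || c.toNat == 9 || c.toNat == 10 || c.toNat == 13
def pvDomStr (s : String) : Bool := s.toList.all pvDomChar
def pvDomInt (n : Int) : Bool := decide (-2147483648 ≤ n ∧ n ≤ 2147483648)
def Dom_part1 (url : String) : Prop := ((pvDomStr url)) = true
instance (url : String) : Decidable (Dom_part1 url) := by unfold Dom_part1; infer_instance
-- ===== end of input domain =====

-- B replaces A's nested split('/')/split('.') loops by one character-level pass; objective: alternative (same cost).

-- ===== PORT A =====
-- compress(s): f'{s[0]}{len(s)-2}{s[-1]}'; the empty-string case is where Python raises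
-- IndexError (excluded by Pre_part1) — the port returns [] there.
def compressA (s : List Char) : List Char :=
  match PySem.List.pyGet? s 0, PySem.List.pyGet? s (-1) with
  | some a, some b => [a] ++ PySem.Int.toChars ((s.length : Int) - 2) ++ [b]
  | _, _ => []

def part1 (url : String) : String :=
  let majorParts := PySem.Chars.splitOn url.toList ['/']
  let compressedUrl := majorParts.map (fun eachPart =>
    let minorParts := PySem.Chars.splitOn eachPart ['.']
    PySem.Chars.join ['.'] (minorParts.map compressA))
  String.mk (PySem.Chars.join ['/'] compressedUrl)

-- ===== PORT B =====
def pvIsSep (c : Char) : Bool := c == '/' || c == '.'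

-- same compress formula as Source B's compress (raises on the empty token, outside Pre_part1)
def compressAlt (s : List Char) : List Char :=
  match PySem.List.pyGet? s 0, PySem.List.pyGet? s (-1) with
  | some a, some b => [a] ++ PySem.Int.toChars ((s.length : Int) - 2) ++ [b]
  | _, _ => []

-- the single pass of Source B: tok = current token, out = pieces emitted so far (''.join = concat)
def part1Go : List Char → List Char → List Char → List Char
  | [], tok, out => out ++ compressAlt tok
  | ch :: rest, tok, out =>
    if pvIsSep ch then part1Go rest [] (out ++ compressAlt tok ++ [ch])
    else part1Go rest (tok ++ [ch]) out

def part1_alt (url : String) : String := String.mk (part1Go url.toList [] [])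

-- ===== PRECONDITION & SPEC =====
-- Pre_ excludes exactly the inputs on which Python A raises IndexError (compress('') on an
-- empty token): the empty url, a leading or trailing separator, or two adjacent separators.
-- Source B raises the same IndexError on exactly these inputs.
def Pre_part1 (url : String) : Prop :=
  url.toList ≠ [] ∧
  url.toList.head?.all (fun c => !pvIsSep c) = true ∧
  url.toList.getLast?.all (fun c => !pvIsSep c) = true ∧
  (url.toList.zip url.toList.tail).all (fun p => !(pvIsSep p.1 && pvIsSep p.2)) = true
instance (url : String) : Decidable (Pre_part1 url) := by unfold Pre_part1; infer_instance

def pvWitness_part1 : String := "ab.cd/ef"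

def Spec_part1 (url : String) (out : String) : Prop := out = part1_alt url
instance (url : String) (out : String) : Decidable (Spec_part1 url out) := by unfold Spec_part1; infer_instance

-- ===== CLAIM (what is proved, stated in full; the proofs are below) =====
def Claim_equal_part1 : Prop := ∀ (url : String), Dom_part1 url → Pre_part1 url → Spec_part1 url (part1 url)

-- ===== LEMMAS AND PROOFS =====

-- a direct structural recursion computing Python split on a single-char separator:
-- sp c l = (first piece, remaining pieces)
def sp (c : Char) : List Char → List Char × List (List Char)
  | [] => ([], [])
  | a :: rest =>
    let r := sp c rest
    if a = c then ([], r.1 :: r.2) else (a :: r.1, r.2)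

theorem splitOn_go_eq (c : Char) (fuel : Nat) :
    ∀ (l cur : List Char) (acc : List (List Char)), l.length < fuel →
      PySem.Chars.splitOn.go [c] fuel l cur acc
        = acc.reverse ++ (cur.reverse ++ (sp c l).1) :: (sp c l).2 := by
  induction fuel with
  | zero => intro l cur acc h; omega
  | succ n ih =>
    intro l cur acc h
    cases l with
    | nil => simp [PySem.Chars.splitOn.go, sp]
    | cons a rest =>
      by_cases hac : a = c
      · subst hac
        rw [PySem.Chars.splitOn.go]
        simp only [List.isPrefixOf, BEq.rfl, Bool.true_and]
        simp only [if_true, List.length_singleton, List.drop_one, List.tail_cons]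
        rw [ih rest [] _ (by simpa using Nat.lt_of_succ_lt_succ h)]
        simp [sp]
      · rw [PySem.Chars.splitOn.go]
        rw [if_neg (by simp [List.isPrefixOf]; exact fun e => hac e.symm)]
        rw [ih rest (a :: cur) acc (by simpa using Nat.lt_of_succ_lt_succ h)]
        simp [sp, hac, List.append_assoc]

theorem splitOn_single (l : List Char) (c : Char) :
    PySem.Chars.splitOn l [c] = (sp c l).1 :: (sp c l).2 := by
  have := splitOn_go_eq c (l.length + 1) l [] [] (by omega)
  simpa [PySem.Chars.splitOn] using this

theorem sp_append (c : Char) (tok l : List Char) (h : c ∉ tok) :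
    sp c (tok ++ l) = (tok ++ (sp c l).1, (sp c l).2) := by
  induction tok with
  | nil => simp
  | cons a t ih =>
    have ha : ¬ a = c := fun e => h (e ▸ List.mem_cons_self ..)
    simp [List.cons_append, sp, ih (fun hm => h (List.mem_cons_of_mem _ hm)), ha]

theorem sp_self (c : Char) (tok : List Char) (h : c ∉ tok) : sp c tok = (tok, []) := by
  have := sp_append c tok [] h
  simpa [sp] using this

theorem join_append_cons (sep x y : List Char) (ps : List (List Char)) :
    PySem.Chars.join sep ((x ++ y) :: ps) = x ++ PySem.Chars.join sep (y :: ps) := by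
  cases ps with
  | nil => simp [PySem.Chars.join_singleton]
  | cons z zs => simp [PySem.Chars.join_cons_cons, List.append_assoc]

def gDot (p : List Char) : List Char :=
  PySem.Chars.join ['.'] (((sp '.' p).1 :: (sp '.' p).2).map compressA)

def hAll (l : List Char) : List Char :=
  PySem.Chars.join ['/'] (((sp '/' l).1 :: (sp '/' l).2).map gDot)

theorem compressAlt_eq (s : List Char) : compressAlt s = compressA s := rfl

theorem g_eq (p : List Char) :
    PySem.Chars.join ['.'] ((PySem.Chars.splitOn p ['.']).map compressA) = gDot p := by
  rw [splitOn_single]; rfl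

theorem part1_eq_h (url : String) : part1 url = String.mk (hAll url.toList) := by
  unfold part1 hAll
  rw [splitOn_single]
  simp only [List.map_cons]
  rw [g_eq, List.map_congr_left (fun p _ => g_eq p)]

def sepFree (tok : List Char) : Prop := ∀ a ∈ tok, pvIsSep a = false

theorem sepFree_slash {tok : List Char} (h : sepFree tok) : '/' ∉ tok := by
  intro hm; have := h _ hm; simp [pvIsSep] at this

theorem sepFree_dot {tok : List Char} (h : sepFree tok) : '.' ∉ tok := by
  intro hm; have := h _ hm; simp [pvIsSep] at this

theorem gDot_tok {tok : List Char} (h : sepFree tok) : gDot tok = compressA tok := by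
  simp [gDot, sp_self '.' tok (sepFree_dot h), PySem.Chars.join_singleton]

theorem hAll_tok {tok : List Char} (h : sepFree tok) : hAll tok = compressA tok := by
  simp [hAll, sp_self '/' tok (sepFree_slash h), PySem.Chars.join_singleton, gDot_tok h]

theorem gDot_dot {tok : List Char} (h : sepFree tok) (p1 : List Char) :
    gDot (tok ++ '.' :: p1) = compressA tok ++ '.' :: gDot p1 := by
  have h1 : sp '.' (tok ++ '.' :: p1) = (tok, (sp '.' p1).1 :: (sp '.' p1).2) := by
    rw [sp_append '.' tok _ (sepFree_dot h)]; simp [sp]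
  simp [gDot, h1, PySem.Chars.join_cons_cons]

theorem hAll_sep {tok : List Char} (h : sepFree tok) {c : Char} (hc : pvIsSep c = true)
    (rest : List Char) : hAll (tok ++ c :: rest) = compressA tok ++ c :: hAll rest := by
  have hc' : c = '/' ∨ c = '.' := by
    simp [pvIsSep] at hc; rcases hc with h | h <;> [left; right] <;> exact h
  rcases hc' with rfl | rfl
  · have h1 : sp '/' (tok ++ '/' :: rest) = (tok, (sp '/' rest).1 :: (sp '/' rest).2) := by
      rw [sp_append '/' tok _ (sepFree_slash h)]; simp [sp]
    simp [hAll, h1, PySem.Chars.join_cons_cons, gDot_tok h]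
  · have h1 : sp '/' (tok ++ '.' :: rest)
        = (tok ++ '.' :: (sp '/' rest).1, (sp '/' rest).2) := by
      have : tok ++ '.' :: rest = (tok ++ ['.']) ++ rest := by simp
      rw [this, sp_append '/' (tok ++ ['.']) rest (by
        intro hm; rcases List.mem_append.mp hm with hm | hm
        · exact sepFree_slash h hm
        · simp at hm)]
      simp
    have h2 : gDot (tok ++ '.' :: (sp '/' rest).1)
        = compressA tok ++ '.' :: gDot (sp '/' rest).1 := gDot_dot h _
    calc hAll (tok ++ '.' :: rest)
        = PySem.Chars.join ['/']
            (((compressA tok ++ ['.']) ++ gDot (sp '/' rest).1) :: ((sp '/' rest).2.map gDot)) := by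
          simp [hAll, h1, h2]
      _ = (compressA tok ++ ['.']) ++ PySem.Chars.join ['/']
            (gDot (sp '/' rest).1 :: ((sp '/' rest).2.map gDot)) := join_append_cons ..
      _ = compressA tok ++ '.' :: hAll rest := by simp [hAll]

theorem part1Go_eq : ∀ (l tok out : List Char), sepFree tok →
    part1Go l tok out = out ++ hAll (tok ++ l) := by
  intro l
  induction l with
  | nil =>
    intro tok out h
    simp [part1Go, compressAlt_eq, hAll_tok h]
  | cons ch rest ih =>
    intro tok out h
    by_cases hs : pvIsSep ch = true
    · rw [part1Go, if_pos hs, ih [] _ (by intro a ha; simp at ha),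
        hAll_sep h hs rest, compressAlt_eq]
      simp
    · rw [part1Go, if_neg hs,
        ih (tok ++ [ch]) out (by
          intro a ha; rcases List.mem_append.mp ha with ha | ha
          · exact h a ha
          · simp at ha; subst ha; simpa using hs)]
      simp

-- ===== VERDICT (by name: the statement is the Claim_ definition above) =====
theorem part1_spec : Claim_equal_part1 := by
  intro url _ _
  unfold Spec_part1
  rw [part1_eq_h, part1_alt, part1Go_eq url.toList [] [] (by intro a ha; simp at ha)]
  simp
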